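-- pv_equiv track=rewrite | github.com/kiernanlabs/ruggles | migrate_to_dynamodb.py | unescape_pg_copy
-- ===== SOURCE A (Python) =====
-- def unescape_pg_copy(field: str) -> str:
--     """Unescape a PG COPY TEXT field (handles \\t \\n \\r \\\\ etc)."""
--     out, i, n = [], 0, len(field)
--     while i < n:
--         c = field[i]
--         if c == "\\" and i + 1 < n:
--             nxt = field[i + 1]
--             mapping = {"t": "\t", "n": "\n", "r": "\r", "b": "\b",
--                        "f": "\f", "v": "\v", "\\": "\\"}
--             if nxt in mapping:
--                 out.append(mapping[nxt])
--                 i += 2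
--                 continue
--         out.append(c)
--         i += 1
--     return "".join(out)
-- ===== SOURCE B (Python) =====
-- _PG_UNESCAPES = {"t": "\t", "n": "\n", "r": "\r", "b": "\b", "f": "\f", "v": "\v"}
--
--
-- def unescape_pg_copy(field: str) -> str:
--     """Unescape a PG COPY TEXT field (handles \\t \\n \\r \\\\ etc)."""
--     parts = field.split("\\")
--     out = [parts[0]]
--     i, n = 1, len(parts)
--     while i < n:
--         p = parts[i]
--         if p:
--             r = _PG_UNESCAPES.get(p[0])
--             out.append(r + p[1:] if r is not None else "\\" + p)
--             i += 1
--         else: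
--             out.append("\\")
--             i += 1
--             if i < n:
--                 out.append(parts[i])
--                 i += 1
--     return "".join(out)
-- ===== Notes on version B (the rewrite author's own statement) =====
-- stated objective: alternative
-- what changed: Replaces A's per-character index/lookahead while-loop with field.split('\\') followed by one pass over the parts list: each later part begins right after a backslash, so a nonempty part's first char is looked up in a module-level table (or the escape is kept verbatim) and an empty part is an escaped backslash whose following part is plain text; str.split does the backslash scan at C speed instead of one Python iteration per character.
import Mathlib
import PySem

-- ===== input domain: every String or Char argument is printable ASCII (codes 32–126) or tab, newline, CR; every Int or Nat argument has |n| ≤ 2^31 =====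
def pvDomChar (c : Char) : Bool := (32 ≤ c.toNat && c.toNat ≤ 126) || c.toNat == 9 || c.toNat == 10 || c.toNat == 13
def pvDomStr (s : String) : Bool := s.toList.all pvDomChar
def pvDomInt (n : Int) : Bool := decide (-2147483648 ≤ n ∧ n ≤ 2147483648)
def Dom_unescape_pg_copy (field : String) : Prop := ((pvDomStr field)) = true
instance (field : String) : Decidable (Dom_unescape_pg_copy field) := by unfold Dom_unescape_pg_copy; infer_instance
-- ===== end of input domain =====

-- B replaces A's per-character index/lookahead loop by field.split('\\') followed by
-- one pass over the parts list (objective: alternative decomposition, same cost).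
-- ===== PORT A =====
-- the dict literal A rebuilds each iteration (values are the 1-char strings, kept as Char)
def pvMappingA : PySem.Dict Char Char :=
  PySem.Dict.ofList [('t', '\t'), ('n', '\n'), ('r', '\r'), ('b', Char.ofNat 8),
                     ('f', Char.ofNat 12), ('v', Char.ofNat 11), ('\\', '\\')]

-- A's while-loop over index i: each step consumes one char, or two on an escape hit
def pvLoopA : List Char → List Char
  | [] => []
  | c :: [] => [c]                              -- i + 1 < n fails: out.append(c); i += 1
  | c :: nxt :: rest' =>
    if c = '\\' then
      match pvMappingA.get? nxt with
      | some r => r :: pvLoopA rest'            -- out.append(mapping[nxt]); i += 2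
      | none => c :: pvLoopA (nxt :: rest')     -- fall through: out.append(c); i += 1
    else c :: pvLoopA (nxt :: rest')

def unescape_pg_copy (field : String) : String := String.ofList (pvLoopA field.toList)

-- ===== PORT B =====
-- module-level table _PG_UNESCAPES (no '\\' key: split already consumed the backslashes)
def pvPgUnescapes : PySem.Dict Char Char :=
  PySem.Dict.ofList [('t', '\t'), ('n', '\n'), ('r', '\r'), ('b', Char.ofNat 8),
                     ('f', Char.ofNat 12), ('v', Char.ofNat 11)]

-- Source B's while-loop over parts[1:]: each part sits right after one backslash of field.
-- A nonempty part starts with an escape character (table hit, or kept verbatim with its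
-- backslash); an empty part is an escaped backslash, whose following part is plain text
-- (an empty part at the end is a trailing backslash).
def pvJoinParts : List (List Char) → List Char
  | [] => []
  | (c :: cs) :: rest =>
      (match pvPgUnescapes.get? c with
       | some r => r :: cs                      -- out.append(r + p[1:])
       | none => '\\' :: c :: cs)               -- out.append("\\" + p)
      ++ pvJoinParts rest
  | [] :: [] => ['\\']                          -- trailing backslash
  | [] :: q :: rest => '\\' :: (q ++ pvJoinParts rest)  -- "\\\\": backslash, next part verbatim

-- parts = field.split("\\"); out = [parts[0]] ++ the loop's appends; "".join(out)
def unescape_pg_copy_alt (field : String) : String :=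
  match PySem.Chars.splitOn field.toList ['\\'] with
  | [] => ""                                    -- unreachable: split never returns []
  | first :: rest => String.ofList (first ++ pvJoinParts rest)

-- ===== PRECONDITION & SPEC =====
def Spec_unescape_pg_copy (field : String) (out : String) : Prop := out = unescape_pg_copy_alt field
instance (field : String) (out : String) : Decidable (Spec_unescape_pg_copy field out) := by unfold Spec_unescape_pg_copy; infer_instance

-- ===== CLAIM (what is proved, stated in full; the proofs are below) =====
def Claim_equal_unescape_pg_copy : Prop := ∀ (field : String), Dom_unescape_pg_copy field → Spec_unescape_pg_copy field (unescape_pg_copy field)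

-- ===== LEMMAS AND PROOFS =====

-- reference form of split on a single '\\' (no fuel, no accumulators)
def pvSplitC : List Char → List (List Char)
  | [] => [[]]
  | c :: rest =>
    if c = '\\' then [] :: pvSplitC rest
    else match pvSplitC rest with
      | p :: ps => (c :: p) :: ps
      | [] => [[c]]

theorem pvSplitC_ne_nil (l : List Char) : pvSplitC l ≠ [] := by
  cases l with
  | nil => simp [pvSplitC]
  | cons c rest =>
    simp only [pvSplitC]
    split_ifs
    · simp
    · cases h : pvSplitC rest <;> simp

theorem pvSplitOn_go_eq (fuel : ℕ) : ∀ (l cur : List Char) (acc : List (List Char)),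
    l.length < fuel →
    PySem.Chars.splitOn.go ['\\'] fuel l cur acc
      = acc.reverse ++ (pvSplitC l).modifyHead (cur.reverse ++ ·) := by
  induction fuel with
  | zero => intro l cur acc h; omega
  | succ fuel ih =>
    intro l cur acc h
    cases l with
    | nil => simp [PySem.Chars.splitOn.go, pvSplitC]
    | cons c rest =>
      by_cases hc : c = '\\'
      · subst hc
        have hpre : List.isPrefixOf ['\\'] ('\\' :: rest) = true := by
          simp [List.isPrefixOf]
        rw [show PySem.Chars.splitOn.go ['\\'] (fuel + 1) ('\\' :: rest) cur acc
              = PySem.Chars.splitOn.go ['\\'] fuel (List.drop 1 ('\\' :: rest)) []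
                  (cur.reverse :: acc) by simp [PySem.Chars.splitOn.go, hpre]]
        rw [show List.drop 1 ('\\' :: rest) = rest from rfl]
        rw [ih rest [] (cur.reverse :: acc) (by simpa using Nat.lt_of_succ_lt_succ h)]
        cases hs : pvSplitC rest with
        | nil => exact absurd hs (pvSplitC_ne_nil rest)
        | cons p ps => simp [pvSplitC, hs]
      · have hpre : List.isPrefixOf ['\\'] (c :: rest) = false := by
          simp [List.isPrefixOf]; intro h'; exact absurd h'.symm hc
        rw [show PySem.Chars.splitOn.go ['\\'] (fuel + 1) (c :: rest) cur acc
              = PySem.Chars.splitOn.go ['\\'] fuel rest (c :: cur) acc by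
            simp [PySem.Chars.splitOn.go, hpre]]
        rw [ih rest (c :: cur) acc (by simpa using Nat.lt_of_succ_lt_succ h)]
        cases hs : pvSplitC rest with
        | nil => exact absurd hs (pvSplitC_ne_nil rest)
        | cons p ps => simp [pvSplitC, hs, hc]

theorem pvSplitOn_eq (l : List Char) : PySem.Chars.splitOn l ['\\'] = pvSplitC l := by
  rw [show PySem.Chars.splitOn l ['\\']
        = PySem.Chars.splitOn.go ['\\'] (l.length + 1) l [] [] from rfl]
  rw [pvSplitOn_go_eq (l.length + 1) l [] [] (Nat.lt_succ_self _)]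
  cases hs : pvSplitC l with
  | nil => exact absurd hs (pvSplitC_ne_nil l)
  | cons p ps => simp

theorem pvLoopA_cons_of_ne (c : Char) (xs : List Char) (h : c ≠ '\\') :
    pvLoopA (c :: xs) = c :: pvLoopA xs := by
  cases xs <;> simp [pvLoopA, h]

-- the two escape tables agree away from '\\' (B's table has no '\\' key)
theorem pvTables_agree (c : Char) (h : c ≠ '\\') :
    pvMappingA.get? c = pvPgUnescapes.get? c := by
  rw [show pvMappingA = PySem.Dict.mk [('t', '\t'), ('n', '\n'), ('r', '\r'),
        ('b', Char.ofNat 8), ('f', Char.ofNat 12), ('v', Char.ofNat 11), ('\\', '\\')]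
      from by decide,
      show pvPgUnescapes = PySem.Dict.mk [('t', '\t'), ('n', '\n'), ('r', '\r'),
        ('b', Char.ofNat 8), ('f', Char.ofNat 12), ('v', Char.ofNat 11)] from by decide]
  simp [PySem.Dict.get?_mk_cons, Ne.symm h]

-- what B's join stage produces from a full parts list
def pvUnsplit : List (List Char) → List Char
  | [] => []
  | first :: rest => first ++ pvJoinParts rest

theorem pvLoopA_eq_unsplit_split : ∀ (n : ℕ) (l : List Char), l.length ≤ n →
    pvLoopA l = pvUnsplit (pvSplitC l) := by
  intro n
  induction n with
  | zero =>
    intro l hl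
    have : l = [] := List.eq_nil_of_length_eq_zero (Nat.le_zero.mp hl)
    subst this; rfl
  | succ n ih =>
    intro l hl
    cases l with
    | nil => rfl
    | cons c rest =>
      have hrest : rest.length ≤ n := Nat.le_of_succ_le_succ (by simpa using hl)
      by_cases hc : c = '\\'
      · subst hc
        cases rest with
        | nil => rfl
        | cons d rest2 =>
          have hrest2 : rest2.length ≤ n := Nat.le_of_succ_le hrest
          by_cases hd : d = '\\'
          · subst hd
            have hget : pvMappingA.get? '\\' = some '\\' := by decide
            cases hs : pvSplitC rest2 with
            | nil => exact absurd hs (pvSplitC_ne_nil rest2)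
            | cons q rest' =>
              have := ih rest2 hrest2
              rw [hs] at this
              simp [pvLoopA, hget, pvSplitC, hs, pvUnsplit, pvJoinParts, this]
          · cases hs : pvSplitC rest2 with
            | nil => exact absurd hs (pvSplitC_ne_nil rest2)
            | cons p ps =>
              have hIH := ih rest2 hrest2
              rw [hs] at hIH
              cases hm : pvPgUnescapes.get? d with
              | some r =>
                have hgA : pvMappingA.get? d = some r := by rw [pvTables_agree d hd, hm]
                simp [pvLoopA, hgA, pvSplitC, hs, hd, pvUnsplit, pvJoinParts, hm, hIH]
              | none =>
                have hgA : pvMappingA.get? d = none := by rw [pvTables_agree d hd, hm]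
                have hcons := pvLoopA_cons_of_ne d rest2 hd
                simp [pvLoopA, hgA, pvSplitC, hs, hd, pvUnsplit, pvJoinParts, hm, hIH, hcons]
      · rw [pvLoopA_cons_of_ne c rest hc]
        have hIH := ih rest hrest
        cases hs : pvSplitC rest with
        | nil => exact absurd hs (pvSplitC_ne_nil rest)
        | cons p ps =>
          rw [hs] at hIH
          simp [pvSplitC, hs, hc, pvUnsplit, hIH]

-- ===== VERDICT (by name: the statement is the Claim_ definition above) =====
theorem unescape_pg_copy_spec : Claim_equal_unescape_pg_copy := by
  intro field _
  unfold Spec_unescape_pg_copy unescape_pg_copy unescape_pg_copy_alt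
  rw [pvSplitOn_eq field.toList]
  cases hs : pvSplitC field.toList with
  | nil => exact absurd hs (pvSplitC_ne_nil field.toList)
  | cons first rest =>
    have := pvLoopA_eq_unsplit_split field.toList.length field.toList le_rfl
    rw [hs] at this
    simp [this, pvUnsplit]
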